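-- pv_equiv track=rewrite | github.com/daniel-reich/ubiquitous-fiesta | dBBhtQqKZb2eDERHg_8.py | numberSequence
-- ===== SOURCE A (Python) =====
-- def numberSequence(n, odd=True, res=None):
--     if res is None:
--         if n < 1:
--             return '-1'
--         if n == 1:
--             return '1'
--         if n == 2:
--             return '1 1'
--         odd = n % 2
--         if odd:
--             n = (n + 1) // 2
--         else:
--             n //= 2
--         res = '{}'.format(n)
--         n -= 1
--     if n > 1:
--         res += ' {}'.format(n)
--     elif n == 1:
--         if odd:
--             return res + ' 1 ' + res[::-1]
--         else:
--             return res + ' 1 1 ' + res[::-1]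
--     return numberSequence(n - 1, odd, res)
-- ===== SOURCE B (Python) =====
-- def numberSequence(n, odd=True, res=None):
--     if res is None:
--         if n < 1:
--             return '-1'
--         if n == 1:
--             return '1'
--         if n == 2:
--             return '1 1'
--         odd = n % 2
--         n = (n + 1) // 2 if odd else n // 2
--         res = str(n)
--         n -= 1
--     s = ' '.join([res] + [str(k) for k in range(n, 1, -1)])
--     mid = ' 1 ' if odd else ' 1 1 '
--     return s + mid + s[::-1]
-- ===== Notes on version B (the rewrite author's own statement) =====
-- stated objective: simpler
-- what changed: A builds the descending token string by deep self-recursion appending one token per call; B normalizes both entry modes into one code path and builds the whole string non-recursively with a single ' '.join over the descending range, then concatenates s + mid + s[::-1]. Pre_ excludes only res supplied together with n < 1, where A recurses forever.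
import Mathlib
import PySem

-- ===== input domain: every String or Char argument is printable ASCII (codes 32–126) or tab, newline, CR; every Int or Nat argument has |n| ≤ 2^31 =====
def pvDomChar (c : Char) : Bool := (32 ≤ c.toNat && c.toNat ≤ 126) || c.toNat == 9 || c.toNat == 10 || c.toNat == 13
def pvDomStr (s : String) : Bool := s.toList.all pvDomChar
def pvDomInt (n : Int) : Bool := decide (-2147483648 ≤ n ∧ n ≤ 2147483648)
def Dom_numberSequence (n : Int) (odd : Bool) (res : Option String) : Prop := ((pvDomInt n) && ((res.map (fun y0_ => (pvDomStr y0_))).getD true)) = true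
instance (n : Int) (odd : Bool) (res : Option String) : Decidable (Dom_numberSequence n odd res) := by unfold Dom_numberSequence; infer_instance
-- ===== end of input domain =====

-- B replaces A's token-per-call self-recursion by a single ' '.join of the descending tokens
-- on one shared code path, then s + mid + reverse(s) (simpler, no recursion).
-- ===== PORT A =====
-- the tail part of A ('if n > 1: res += " n"; elif n == 1: return …; recurse n-1'),
-- with fuel for the calls where the Python recursion never terminates (n < 1 with res set;
-- excluded by Pre_): there it returns [] — Python raises RecursionError.
def numberSequenceGo (fuel : Nat) (n : Int) (odd : Bool) (res : List Char) : List Char :=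
  match fuel with
  | 0 => []
  | fuel + 1 =>
    if n > 1 then numberSequenceGo fuel (n - 1) odd (res ++ ' ' :: PySem.Int.toChars n)
    else if n = 1 then
      if odd then res ++ " 1 ".toList ++ res.reverse          -- res + ' 1 ' + res[::-1]
      else res ++ " 1 1 ".toList ++ res.reverse               -- res + ' 1 1 ' + res[::-1]
    else numberSequenceGo fuel (n - 1) odd res

def numberSequence (n : Int) (odd : Bool) (res : Option String) : String :=
  match res with
  | some r => String.ofList (numberSequenceGo (n.toNat + 1) n odd r.toList)
  | none =>
    if n < 1 then "-1"
    else if n = 1 then "1"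
    else if n = 2 then "1 1"
    else
      let odd := PySem.Int.mod n 2 != 0                       -- odd = n % 2 (truthiness)
      let m := if odd then PySem.Int.floordiv (n + 1) 2 else PySem.Int.floordiv n 2
      -- res = str(m); n = m - 1; fall through to the tail part
      String.ofList (numberSequenceGo ((m - 1).toNat + 1) (m - 1) odd (PySem.Int.toChars m))

-- ===== PORT B =====
-- s = ' '.join([res] + [str(k) for k in range(n, 1, -1)]); s + mid + s[::-1]
def nsBody (n : Int) (odd : Bool) (res : List Char) : List Char :=
  let s := PySem.Chars.join " ".toList (res :: (PySem.List.pyRange n 1 (-1)).map PySem.Int.toChars)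
  let mid := if odd then " 1 ".toList else " 1 1 ".toList
  s ++ mid ++ s.reverse

def numberSequence_alt (n : Int) (odd : Bool) (res : Option String) : String :=
  match res with
  | some r => String.ofList (nsBody n odd r.toList)
  | none =>
    if n < 1 then "-1"
    else if n = 1 then "1"
    else if n = 2 then "1 1"
    else
      let odd := PySem.Int.mod n 2 != 0
      let m := if odd then PySem.Int.floordiv (n + 1) 2 else PySem.Int.floordiv n 2
      String.ofList (nsBody (m - 1) odd (PySem.Int.toChars m))

-- ===== PRECONDITION & SPEC =====
-- Pre_ excludes only res = some _ with n < 1, where Python A recurses forever (RecursionError).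
def Pre_numberSequence (n : Int) (odd : Bool) (res : Option String) : Prop :=
  res = none ∨ 1 ≤ n
instance (n : Int) (odd : Bool) (res : Option String) : Decidable (Pre_numberSequence n odd res) := by unfold Pre_numberSequence; infer_instance
def pvWitness_numberSequence : Int × Bool × Option String := (7, true, none)

def Spec_numberSequence (n : Int) (odd : Bool) (res : Option String) (out : String) : Prop := out = numberSequence_alt n odd res
instance (n : Int) (odd : Bool) (res : Option String) (out : String) : Decidable (Spec_numberSequence n odd res out) := by unfold Spec_numberSequence; infer_instance

-- ===== CLAIM (what is proved, stated in full; the proofs are below) =====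
def Claim_equal_numberSequence : Prop := ∀ (n : Int) (odd : Bool) (res : Option String), Dom_numberSequence n odd res → Pre_numberSequence n odd res → Spec_numberSequence n odd res (numberSequence n odd res)
-- ===== LEMMAS AND PROOFS =====
-- the suffix ''.join(' {k}' for k in range(n, 1, -1)) that A's tail recursion accumulates
def pvTail (n : Int) : List Char :=
  PySem.Chars.join [] ((PySem.List.pyRange n 1 (-1)).map (fun k => ' ' :: PySem.Int.toChars k))

theorem pvTail_one : pvTail 1 = [] := by
  rw [pvTail, PySem.List.pyRange_neg_one_eq_nil le_rfl, List.map_nil, PySem.Chars.join_nil]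

theorem pvTail_step (n : Int) (h : 1 < n) :
    pvTail n = (' ' :: PySem.Int.toChars n) ++ pvTail (n - 1) := by
  rw [pvTail, PySem.List.pyRange_neg_one_cons h, List.map_cons]
  cases hr : (PySem.List.pyRange (n - 1) 1 (-1)).map (fun k => ' ' :: PySem.Int.toChars k) with
  | nil => rw [PySem.Chars.join_singleton, pvTail, hr, PySem.Chars.join_nil, List.append_nil]
  | cons a l => rw [PySem.Chars.join_cons_cons, pvTail, hr]; simp

-- A's tail recursion computes (res ++ pvTail n) ++ sep ++ reverse, given enough fuel
theorem go_eq (fuel : Nat) (n : Int) (odd : Bool) (res : List Char)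
    (h1 : 1 ≤ n) (hf : n.toNat ≤ fuel) :
    numberSequenceGo fuel n odd res =
      (res ++ pvTail n) ++ (if odd then " 1 ".toList else " 1 1 ".toList) ++ (res ++ pvTail n).reverse := by
  induction fuel generalizing n res with
  | zero => omega
  | succ fuel ih =>
    by_cases hn : n = 1
    · subst hn
      simp only [numberSequenceGo, pvTail_one, List.append_nil]
      cases odd <;> simp
    · have hgt : 1 < n := by omega
      rw [numberSequenceGo]
      rw [if_pos hgt, ih (n - 1) _ (by omega) (by omega), pvTail_step n hgt]
      simp

-- B's single join equals res followed by A's accumulated suffix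
theorem join_pref (n : Int) (h : 1 ≤ n) (r : List Char) :
    PySem.Chars.join " ".toList (r :: (PySem.List.pyRange n 1 (-1)).map PySem.Int.toChars)
      = r ++ pvTail n := by
  obtain ⟨k, hk⟩ : ∃ k : Nat, n = (k : Int) + 1 := ⟨(n - 1).toNat, by omega⟩
  subst hk
  clear h
  induction k generalizing r with
  | zero =>
    rw [show ((0:Nat):Int) + 1 = 1 by norm_num]
    rw [PySem.List.pyRange_neg_one_eq_nil le_rfl, List.map_nil,
        PySem.Chars.join_singleton, pvTail_one, List.append_nil]
  | succ k ih =>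
    have e1 : ((k+1:Nat):Int) + 1 = ((k:Int) + 1) + 1 := by push_cast; ring
    rw [e1]
    rw [PySem.List.pyRange_neg_one_cons (by omega), List.map_cons,
        PySem.Chars.join_cons_cons]
    rw [show ((k:Int)+1)+1-1 = (k:Int)+1 by ring]
    rw [ih (PySem.Int.toChars ((k:Int)+1+1))]
    rw [pvTail_step ((k:Int)+1+1) (by omega)]
    rw [show ((k:Int)+1)+1-1 = (k:Int)+1 by ring]
    simp

theorem mod_two (n : Int) : PySem.Int.mod n 2 = n % 2 := by
  unfold PySem.Int.mod; rw [Int.fmod_eq_emod]; simp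

theorem floordiv_two_ge (a : Int) (h : 4 ≤ a) : 2 ≤ PySem.Int.floordiv a 2 := by
  unfold PySem.Int.floordiv; rw [Int.fdiv_eq_ediv]; simp; omega

-- ===== VERDICT (by name: the statement is the Claim_ definition above) =====
theorem numberSequence_spec : Claim_equal_numberSequence := by
  intro n odd res _ hpre
  unfold Spec_numberSequence
  cases res with
  | some r =>
    have h1 : 1 ≤ n := by
      rcases hpre with h | h
      · exact absurd h (by simp)
      · exact h
    show String.ofList (numberSequenceGo (n.toNat + 1) n odd r.toList) = String.ofList (nsBody n odd r.toList)
    rw [go_eq _ n odd r.toList h1 (by omega), nsBody, join_pref n h1]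
  | none =>
    by_cases h1 : n < 1
    · simp [numberSequence, numberSequence_alt, h1]
    · by_cases h2 : n = 1
      · simp [numberSequence, numberSequence_alt, h2]
      · by_cases h3 : n = 2
        · simp [numberSequence, numberSequence_alt, h3]
        · show (if n < 1 then "-1" else if n = 1 then "1" else if n = 2 then "1 1" else _) =
               (if n < 1 then "-1" else if n = 1 then "1" else if n = 2 then "1 1" else _)
          rw [if_neg h1, if_neg h2, if_neg h3, if_neg h1, if_neg h2, if_neg h3]
          show String.ofList (numberSequenceGo _ _ _ _) = String.ofList (nsBody _ _ _)
          set ob := (PySem.Int.mod n 2 != 0) with hob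
          set m := (if ob then PySem.Int.floordiv (n + 1) 2 else PySem.Int.floordiv n 2) with hm
          have hm2 : 2 ≤ m := by
            rw [hm, hob]
            by_cases ho : PySem.Int.mod n 2 = 0
            · have h4 : 4 ≤ n := by
                rw [mod_two] at ho; omega
              simp only [ho, bne_self_eq_false, Bool.false_eq_true, if_false]
              exact floordiv_two_ge n h4
            · have hb : (PySem.Int.mod n 2 != 0) = true := bne_iff_ne.mpr ho
              rw [hb, if_pos rfl]
              exact floordiv_two_ge (n + 1) (by omega)
          rw [go_eq _ (m - 1) _ (PySem.Int.toChars m) (by omega) (by omega)]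
          rw [nsBody, join_pref (m - 1) (by omega)]
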